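-- pv_equiv track=rewrite | github.com/pypi-data/pypi-mirror-395 | packages/splunk-appinspect/splunk_appinspect-4.1.2.tar.gz/splunk_appinspect-4.1.2/splunk_appinspect/python_modules_metadata/python_modules_metadata_store.py | _is_namespace_prefix
-- ===== SOURCE A (Python) =====
-- def _is_namespace_prefix(prefix: str, namespace: str) -> bool:
--     name_array1, name_array2 = prefix.split("."), namespace.split(".")
--     if len(name_array1) > len(name_array2):
--         return False
--
--     for name1, name2 in zip(name_array1, name_array2):
--         if not name1 == name2:
--             return False
--     return True
-- ===== SOURCE B (Python) =====
-- def _is_namespace_prefix(prefix: str, namespace: str) -> bool: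
--     return namespace == prefix or namespace.startswith(prefix + ".")
-- ===== Notes on version B (the rewrite author's own statement) =====
-- stated objective: idiomatic
-- what changed: B drops the tokenize-into-component-lists-and-zip loop and tests the component-prefix relation directly on the raw strings: exact equality or startswith(prefix + '.'), the dot sentinel keeping component boundaries aligned.
import Mathlib
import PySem

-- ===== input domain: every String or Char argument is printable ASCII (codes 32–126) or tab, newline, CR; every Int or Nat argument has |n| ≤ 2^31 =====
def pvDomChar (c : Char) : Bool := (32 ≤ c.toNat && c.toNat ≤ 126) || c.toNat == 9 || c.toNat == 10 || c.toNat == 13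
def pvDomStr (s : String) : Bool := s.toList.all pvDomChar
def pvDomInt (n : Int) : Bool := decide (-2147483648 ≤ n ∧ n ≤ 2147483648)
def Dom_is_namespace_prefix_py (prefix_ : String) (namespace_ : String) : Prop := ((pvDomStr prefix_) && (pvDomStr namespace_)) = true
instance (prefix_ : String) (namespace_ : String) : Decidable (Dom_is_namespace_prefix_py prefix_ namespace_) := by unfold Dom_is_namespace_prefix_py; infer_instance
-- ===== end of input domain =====

-- B replaces A's split-into-component-lists-plus-zip loop with two direct string
-- comparisons (exact equality, or startswith with a '.' sentinel); objective: idiomatic.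

-- ===== PORT A =====
-- the `for name1, name2 in zip(...): if not name1 == name2: return False` loop
def pvALoop : List (List Char × List Char) → Bool
  | [] => true
  | (name1, name2) :: rest => if ¬ (name1 == name2) then false else pvALoop rest

def is_namespace_prefix_py (prefix_ : String) (namespace_ : String) : Bool :=
  let name_array1 := PySem.Chars.splitOn prefix_.toList ['.']
  let name_array2 := PySem.Chars.splitOn namespace_.toList ['.']
  if name_array1.length > name_array2.length then false
  else pvALoop (name_array1.zip name_array2)

-- ===== PORT B =====
def is_namespace_prefix_py_alt (prefix_ : String) (namespace_ : String) : Bool :=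
  namespace_ == prefix_ ||
    PySem.Chars.startswith namespace_.toList (prefix_.toList ++ ['.'])

-- ===== PRECONDITION & SPEC =====
def Spec_is_namespace_prefix_py (prefix_ : String) (namespace_ : String) (out : Bool) : Prop := out = is_namespace_prefix_py_alt prefix_ namespace_
instance (prefix_ : String) (namespace_ : String) (out : Bool) : Decidable (Spec_is_namespace_prefix_py prefix_ namespace_ out) := by unfold Spec_is_namespace_prefix_py; infer_instance

-- ===== CLAIM (what is proved, stated in full; the proofs are below) =====
def Claim_equal_is_namespace_prefix_py : Prop := ∀ (prefix_ : String) (namespace_ : String), Dom_is_namespace_prefix_py prefix_ namespace_ → Spec_is_namespace_prefix_py prefix_ namespace_ (is_namespace_prefix_py prefix_ namespace_)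

-- ===== LEMMAS AND PROOFS =====

-- a simple structural characterisation of splitting on a single '.'
def pvSplitDot : List Char → List (List Char)
  | [] => [[]]
  | c :: rest =>
    if c = '.' then [] :: pvSplitDot rest
    else
      match pvSplitDot rest with
      | [] => [[c]]        -- unreachable: pvSplitDot never returns []
      | p :: ps => (c :: p) :: ps

theorem pvSplitDot_ne_nil (l : List Char) : pvSplitDot l ≠ [] := by
  cases l with
  | nil => simp [pvSplitDot]
  | cons c rest =>
    simp only [pvSplitDot]
    split
    · simp
    · split <;> simp

theorem pvGo_eq (fuel : Nat) : ∀ (l cur : List Char) (acc : List (List Char)),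
    l.length ≤ fuel →
    PySem.Chars.splitOn.go ['.'] fuel l cur acc
      = acc.reverse ++ ((pvSplitDot l).modifyHead (cur.reverse ++ ·)) := by
  induction fuel with
  | zero =>
    intro l cur acc h
    have : l = [] := by
      cases l with
      | nil => rfl
      | cons a b => simp at h
    subst this
    simp [PySem.Chars.splitOn.go, pvSplitDot]
  | succ f ih =>
    intro l cur acc h
    cases l with
    | nil => simp [PySem.Chars.splitOn.go, pvSplitDot]
    | cons c rest =>
      by_cases hc : c = '.'
      · subst hc
        have hpre : List.isPrefixOf ['.'] ('.' :: rest) = true := by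
          simp [List.isPrefixOf]
        rw [PySem.Chars.splitOn.go, if_pos hpre]
        have hlen : rest.length ≤ f := by simpa using h
        rw [show List.drop (['.'] : List Char).length ('.' :: rest) = rest from rfl]
        rw [ih rest [] (cur.reverse :: acc) hlen]
        cases hr : pvSplitDot rest <;> simp [pvSplitDot, hr]
      · have hpre : List.isPrefixOf ['.'] (c :: rest) = false := by
          simp only [List.isPrefixOf, Bool.and_eq_false_iff]
          left
          simpa [beq_iff_eq] using fun h => hc h.symm
        rw [PySem.Chars.splitOn.go, if_neg (by simp [hpre])]
        have hlen : rest.length ≤ f := by simpa using h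
        rw [ih rest (c :: cur) acc hlen]
        simp only [pvSplitDot, if_neg hc]
        obtain ⟨p, ps, hps⟩ : ∃ p ps, pvSplitDot rest = p :: ps := by
          cases hr : pvSplitDot rest with
          | nil => exact absurd hr (pvSplitDot_ne_nil rest)
          | cons p ps => exact ⟨p, ps, rfl⟩
        rw [hps]
        simp

theorem pvSplitOn_eq (l : List Char) :
    PySem.Chars.splitOn l ['.'] = pvSplitDot l := by
  have := pvGo_eq (l.length + 1) l [] [] (by omega)
  rw [PySem.Chars.splitOn, this]
  cases pvSplitDot l <;> simp

-- the length-guard plus the zip loop is exactly the list-prefix relation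
theorem pvALoop_prefix : ∀ (a b : List (List Char)),
    ((if a.length > b.length then false else pvALoop (a.zip b)) = true) ↔ a <+: b := by
  intro a
  induction a with
  | nil => intro b; simp [pvALoop]
  | cons x a' ih =>
    intro b
    cases b with
    | nil => simp [List.length]
    | cons y b' =>
      simp only [List.zip_cons_cons, List.length_cons, pvALoop, gt_iff_lt,
        Nat.add_lt_add_iff_right, List.cons_prefix_cons]
      by_cases hxy : x = y
      · subst hxy
        simpa using (ih b')
      · simp [hxy]

-- component-wise prefix on the splits ↔ equality-or-dot-sentinel prefix on the raw chars
theorem pvMain : ∀ (p n : List Char),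
    (pvSplitDot p <+: pvSplitDot n) ↔ (n = p ∨ (p ++ ['.']) <+: n) := by
  intro p
  induction p with
  | nil =>
    intro n
    cases n with
    | nil => simp [pvSplitDot]
    | cons b n' =>
      by_cases hb : b = '.'
      · subst hb; simp [pvSplitDot]
      · obtain ⟨r, rs, hr⟩ : ∃ r rs, pvSplitDot n' = r :: rs := by
          cases hn : pvSplitDot n' with
          | nil => exact absurd hn (pvSplitDot_ne_nil n')
          | cons r rs => exact ⟨r, rs, rfl⟩
        simp [pvSplitDot, hb, hr, List.cons_prefix_cons, Ne.symm hb]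
  | cons a p' ih =>
    intro n
    by_cases ha : a = '.'
    · subst ha
      cases n with
      | nil =>
        simp [pvSplitDot, List.cons_prefix_cons, pvSplitDot_ne_nil p']
      | cons b n' =>
        by_cases hb : b = '.'
        · subst hb
          simpa [pvSplitDot, List.cons_prefix_cons] using (ih n')
        · obtain ⟨r, rs, hr⟩ : ∃ r rs, pvSplitDot n' = r :: rs := by
            cases hn : pvSplitDot n' with
            | nil => exact absurd hn (pvSplitDot_ne_nil n')
            | cons r rs => exact ⟨r, rs, rfl⟩
          simp [pvSplitDot, hb, hr, List.cons_prefix_cons, Ne.symm hb]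
    · obtain ⟨q, qs, hq⟩ : ∃ q qs, pvSplitDot p' = q :: qs := by
        cases hp : pvSplitDot p' with
        | nil => exact absurd hp (pvSplitDot_ne_nil p')
        | cons q qs => exact ⟨q, qs, rfl⟩
      cases n with
      | nil =>
        simp [pvSplitDot, ha, hq, List.cons_prefix_cons]
      | cons b n' =>
        by_cases hb : b = '.'
        · subst hb
          simp only [pvSplitDot, if_neg ha, hq]
          constructor
          · intro h
            have := (List.cons_prefix_cons.mp h).1
            simp at this
          · rintro (h | h)
            · have h1 : ('.' : Char) = a := by injection h
              exact absurd h1.symm ha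
            · have h1 := (List.cons_prefix_cons.mp (by simpa using h)).1
              exact absurd h1 ha
        · obtain ⟨r, rs, hr⟩ : ∃ r rs, pvSplitDot n' = r :: rs := by
            cases hn : pvSplitDot n' with
            | nil => exact absurd hn (pvSplitDot_ne_nil n')
            | cons r rs => exact ⟨r, rs, rfl⟩
          by_cases hab : a = b
          · subst hab
            have hiff : ((q :: qs <+: r :: rs)) ↔ (n' = p' ∨ p' ++ ['.'] <+: n') := by
              rw [← hq, ← hr]; exact ih n'
            simp only [pvSplitDot, if_neg ha, hq, hr, List.cons_append]
            rw [List.cons_prefix_cons, List.cons_prefix_cons]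
            constructor
            · rintro ⟨hhead, htail⟩
              have hqr : q = r := by injection hhead
              rcases hiff.mp (List.cons_prefix_cons.mpr ⟨hqr, htail⟩) with h1 | h1
              · exact Or.inl (by rw [h1])
              · exact Or.inr ⟨rfl, h1⟩
            · rintro (h1 | ⟨-, h1⟩)
              · have h2 : n' = p' := by injection h1
                have := List.cons_prefix_cons.mp (hiff.mpr (Or.inl h2))
                exact ⟨by rw [this.1], this.2⟩
              · have := List.cons_prefix_cons.mp (hiff.mpr (Or.inr h1))
                exact ⟨by rw [this.1], this.2⟩
          · simp [pvSplitDot, ha, hb, hq, hr, List.cons_prefix_cons, hab, Ne.symm hab]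

theorem pv_eq (prefix_ namespace_ : String) :
    is_namespace_prefix_py prefix_ namespace_ = is_namespace_prefix_py_alt prefix_ namespace_ := by
  rw [Bool.eq_iff_iff]
  unfold is_namespace_prefix_py is_namespace_prefix_py_alt
  rw [pvSplitOn_eq, pvSplitOn_eq]
  rw [pvALoop_prefix, pvMain]
  rw [Bool.or_eq_true, PySem.Chars.startswith_iff, beq_iff_eq]
  constructor
  · rintro (h | h)
    · left; exact String.toList_inj.mp h.symm |>.symm
    · right; exact h
  · rintro (h | h)
    · left; exact congrArg String.toList h
    · right; exact h

-- ===== VERDICT (by name: the statement is the Claim_ definition above) =====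
theorem is_namespace_prefix_py_spec : Claim_equal_is_namespace_prefix_py := by
  intro prefix_ namespace_ _
  unfold Spec_is_namespace_prefix_py
  exact pv_eq prefix_ namespace_
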